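-- pv_equiv track=rewrite | github.com/irt21/AoC2020 | Day_07/task7.py | get_outers
-- ===== SOURCE A (Python) =====
-- def get_outers(roolz):
--     inverse_roolz = {}
--     for k in roolz:
--         arr = []
--         for k_prime in roolz:
--             if k in roolz[k_prime]:
--                 arr.append(k_prime)
--         inverse_roolz[k] = arr
--     return inverse_roolz
-- ===== SOURCE B (Python) =====
-- def get_outers(roolz):
--     inverse_roolz = {k: [] for k in roolz}
--     for k_prime, vals in roolz.items():
--         for v in dict.fromkeys(vals):
--             if v in inverse_roolz:
--                 inverse_roolz[v].append(k_prime)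
--     return inverse_roolz
-- ===== Notes on version B (the rewrite author's own statement) =====
-- stated objective: faster
-- what changed: A scans all keys for every key (checking 'k in roolz[k_prime]' each time); B preinitializes the inverse dict with empty lists and makes a single pass over the items, appending k_prime to the inverse entry of each distinct contained bag.
import Mathlib
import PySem

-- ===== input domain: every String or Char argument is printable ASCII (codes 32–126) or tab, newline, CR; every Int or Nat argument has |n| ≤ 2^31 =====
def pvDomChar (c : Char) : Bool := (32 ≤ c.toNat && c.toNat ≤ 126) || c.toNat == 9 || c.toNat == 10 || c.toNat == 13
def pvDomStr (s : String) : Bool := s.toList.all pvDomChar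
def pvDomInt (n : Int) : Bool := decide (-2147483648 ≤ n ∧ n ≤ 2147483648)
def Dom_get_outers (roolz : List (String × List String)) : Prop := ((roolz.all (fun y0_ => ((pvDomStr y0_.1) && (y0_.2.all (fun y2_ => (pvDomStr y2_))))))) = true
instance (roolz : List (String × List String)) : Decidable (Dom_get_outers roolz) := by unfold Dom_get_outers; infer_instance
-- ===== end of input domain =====

-- B replaces A's quadratic key×key scan by one pass over the dict's edges appended into a
-- preinitialized inverse dict (objective: faster, asymptotic).
-- Both ports first normalize the association list into a PySem.Dict, since the Python
-- function receives a dict (duplicate keys overwrite as in Python dict construction).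

-- ===== PORT A =====
def get_outers (roolz : List (String × List String)) : List (String × List String) :=
  let d : PySem.Dict String (List String) := PySem.Dict.ofList roolz
  -- inverse_roolz = {}; for k in roolz: arr = []; for k_prime in roolz: if k in roolz[k_prime]: arr.append(k_prime); inverse_roolz[k] = arr
  let inverse := d.keys.foldl (fun inv k =>
      let arr := d.keys.foldl (fun arr kp =>
          if (d.getD kp []).contains k then arr ++ [kp] else arr) []
      inv.insert k arr) (PySem.Dict.empty : PySem.Dict String (List String))
  inverse.items

-- ===== PORT B =====
def get_outers_alt (roolz : List (String × List String)) : List (String × List String) :=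
  let d : PySem.Dict String (List String) := PySem.Dict.ofList roolz
  -- inverse_roolz = {k: [] for k in roolz}
  let inv0 := d.keys.foldl (fun inv k => inv.insert k ([] : List String))
      (PySem.Dict.empty : PySem.Dict String (List String))
  -- for k_prime, vals in roolz.items(): for v in dict.fromkeys(vals): if v in inverse_roolz: inverse_roolz[v].append(k_prime)
  let inv := d.items.foldl (fun inv p =>
      (PySem.List.dedup p.2).foldl (fun inv v =>
        if inv.contains v then inv.modify v [] (· ++ [p.1]) else inv) inv) inv0
  inv.items

-- ===== PRECONDITION & SPEC =====
def Spec_get_outers (roolz : List (String × List String)) (out : List (String × List String)) : Prop := out = get_outers_alt roolz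
instance (roolz : List (String × List String)) (out : List (String × List String)) : Decidable (Spec_get_outers roolz out) := by unfold Spec_get_outers; infer_instance

-- ===== CLAIM (what is proved, stated in full; the proofs are below) =====
def Claim_equal_get_outers : Prop := ∀ (roolz : List (String × List String)), Dom_get_outers roolz → Spec_get_outers roolz (get_outers roolz)

-- ===== LEMMAS AND PROOFS =====

-- Inner loop of B: one pass over a Nodup list `us` of contained bags, appending `kp`
-- to the inverse entry of every bag in `us` that is a key of `inv`.
theorem b_inner (us : List String) (kp : String) (inv : PySem.Dict String (List String))
    (hus : us.Nodup) :
    (us.foldl (fun inv v =>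
        if inv.contains v then inv.modify v [] (· ++ [kp]) else inv) inv).keys = inv.keys ∧
    ∀ k, (us.foldl (fun inv v =>
        if inv.contains v then inv.modify v [] (· ++ [kp]) else inv) inv).getD k [] =
      inv.getD k [] ++ (if k ∈ us ∧ inv.contains k then [kp] else []) := by
  induction us generalizing inv with
  | nil => simp
  | cons u rest ih =>
    have hnd := List.nodup_cons.mp hus
    simp only [List.foldl_cons]
    by_cases hc : inv.contains u
    · have ih' := ih (inv.modify u [] (· ++ [kp])) hnd.2
      simp only [hc, if_true]
      refine ⟨?_, ?_⟩
      · rw [ih'.1, PySem.Dict.keys_modify, PySem.Dict.keys_insert_of_contains _ _ hc]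
      · intro k
        rw [ih'.2 k, PySem.Dict.getD_modify, PySem.Dict.contains_modify]
        by_cases hk : k = u
        · subst hk
          simp [hnd.1, hc]
        · simp only [if_neg hk]
          have : (k == u) = false := by simp [hk]
          simp [this, hk, List.mem_cons]
    · have ih' := ih inv hnd.2
      rw [Bool.not_eq_true] at hc
      simp only [hc, Bool.false_eq_true, if_false]
      refine ⟨ih'.1, ?_⟩
      intro k
      rw [ih'.2 k]
      by_cases hk : k = u
      · subst hk; simp [hc]
      · simp [hk, List.mem_cons]

-- Outer loop of B: one pass over the items, filtering the outer keys per contained bag.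
theorem b_outer (ps : List (String × List String)) (inv : PySem.Dict String (List String)) :
    (ps.foldl (fun inv p =>
        (PySem.List.dedup p.2).foldl (fun inv v =>
          if inv.contains v then inv.modify v [] (· ++ [p.1]) else inv) inv) inv).keys = inv.keys ∧
    ∀ k, (ps.foldl (fun inv p =>
        (PySem.List.dedup p.2).foldl (fun inv v =>
          if inv.contains v then inv.modify v [] (· ++ [p.1]) else inv) inv) inv).getD k [] =
      inv.getD k [] ++ (if inv.contains k then
        (ps.filter (fun p => p.2.contains k)).map Prod.fst else []) := by
  induction ps generalizing inv with
  | nil => simp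
  | cons p rest ih =>
    simp only [List.foldl_cons]
    have hinner := b_inner (PySem.List.dedup p.2) p.1 inv (PySem.List.nodup_dedup p.2)
    set inv' := (PySem.List.dedup p.2).foldl (fun inv v =>
        if inv.contains v then inv.modify v [] (· ++ [p.1]) else inv) inv with hinv'
    have ih' := ih inv'
    have hcont : ∀ k, inv'.contains k = inv.contains k := by
      intro k
      rw [PySem.Dict.contains_eq_decide_mem_keys, PySem.Dict.contains_eq_decide_mem_keys,
        hinner.1]
    refine ⟨by rw [ih'.1, hinner.1], ?_⟩
    intro k
    rw [ih'.2 k, hinner.2 k, hcont k]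
    simp only [PySem.List.mem_dedup, List.filter_cons]
    by_cases hc : inv.contains k
    · by_cases hm : k ∈ p.2
      · simp [hc, hm, List.append_assoc]
      · simp [hc, hm]
    · simp [hc]

-- Both sides reduced to the same closed form over the normalized dict.
theorem ports_agree (roolz : List (String × List String)) :
    get_outers roolz = get_outers_alt roolz := by
  unfold get_outers get_outers_alt
  set d : PySem.Dict String (List String) := PySem.Dict.ofList roolz with hd
  have hks : d.keys.Nodup := PySem.Dict.nodup_keys_ofList roolz
  -- A side
  have hA : (d.keys.foldl (fun inv k =>
      let arr := d.keys.foldl (fun arr kp =>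
          if (d.getD kp []).contains k then arr ++ [kp] else arr) []
      inv.insert k arr) (PySem.Dict.empty : PySem.Dict String (List String))).items =
      d.keys.map (fun k => (k, (d.keys.filter (fun kp => (d.getD kp []).contains k)))) := by
    have := PySem.Dict.items_foldl_insert_fresh (l := d.keys) (k := fun k => k)
      (v := fun k => d.keys.foldl (fun arr kp =>
          if (d.getD kp []).contains k then arr ++ [kp] else arr) [])
      (d := (PySem.Dict.empty : PySem.Dict String (List String)))
      (by intro a _; simp) (by simpa using hks)
    rw [this]
    simp only [show (PySem.Dict.empty : PySem.Dict String (List String)).items = [] from rfl,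
      List.nil_append]
    refine List.map_congr_left ?_
    intro k _
    have := PySem.List.foldl_append_if (fun kp => (d.getD kp []).contains k) (fun kp => kp)
      d.keys []
    simp only [this, List.nil_append, List.map_id']
  -- B side
  have hB0 : (d.keys.foldl (fun inv k => inv.insert k ([] : List String))
      (PySem.Dict.empty : PySem.Dict String (List String))).items =
      d.keys.map (fun k => (k, ([] : List String))) := by
    have := PySem.Dict.items_foldl_insert_fresh (l := d.keys) (k := fun k => k)
      (v := fun _ => ([] : List String))
      (d := (PySem.Dict.empty : PySem.Dict String (List String)))
      (by intro a _; simp) (by simpa using hks)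
    rw [this]
    simp only [show (PySem.Dict.empty : PySem.Dict String (List String)).items = [] from rfl,
      List.nil_append]
  set inv0 := d.keys.foldl (fun inv k => inv.insert k ([] : List String))
      (PySem.Dict.empty : PySem.Dict String (List String)) with hinv0
  have hkeys0 : inv0.keys = d.keys := by
    show inv0.items.map Prod.fst = d.keys
    rw [hB0, List.map_map]
    simp [Function.comp_def]
  have hnd0 : inv0.keys.Nodup := by rw [hkeys0]; exact hks
  have hcont0 : ∀ k, k ∈ d.keys → inv0.contains k = true := by
    intro k hk
    rw [PySem.Dict.contains_eq_decide_mem_keys, hkeys0]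
    simpa using hk
  have hgetD0 : ∀ k, k ∈ d.keys → inv0.getD k [] = [] := by
    intro k hk
    have hmem : (k, ([] : List String)) ∈ inv0.items := by
      rw [hB0]; exact List.mem_map.mpr ⟨k, hk, rfl⟩
    exact PySem.Dict.getD_of_mem_items _ hmem hnd0 []
  have hout := b_outer d.items inv0
  set invF := d.items.foldl (fun inv p =>
      (PySem.List.dedup p.2).foldl (fun inv v =>
        if inv.contains v then inv.modify v [] (· ++ [p.1]) else inv) inv) inv0 with hinvF
  have hkeysF : invF.keys = d.keys := by rw [hout.1, hkeys0]
  have hndF : invF.keys.Nodup := by rw [hkeysF]; exact hks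
  have hBitems : invF.items = d.keys.map (fun k =>
      (k, (d.items.filter (fun p => p.2.contains k)).map Prod.fst)) := by
    rw [PySem.Dict.items_eq_map_keys invF hndF [], hkeysF]
    refine List.map_congr_left ?_
    intro k hk
    rw [hout.2 k, hgetD0 k hk, hcont0 k hk]
    simp
  rw [hA, hBitems]
  refine List.map_congr_left ?_
  intro k _
  have hitems : d.items = d.keys.map (fun kp => (kp, d.getD kp [])) :=
    PySem.Dict.items_eq_map_keys d hks []
  rw [hitems, List.filter_map, List.map_map]
  simp only [Function.comp_def]
  simp

-- ===== VERDICT (by name: the statement is the Claim_ definition above) =====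
theorem get_outers_spec : Claim_equal_get_outers := by
  intro roolz _
  unfold Spec_get_outers
  exact ports_agree roolz
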